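-- pv_equiv track=rewrite | github.com/AlexanderK79/AoC | 2023/Day21.py | calcMaps
-- ===== SOURCE A (Python) =====
-- def calcMaps(fCycles):
--     # returns a tuple with (#even maps, #odd maps)
--     p = fCycles % 2
--     if p == 0:
--         full_odd_maps  = sum([(i-1)*4 for i in range (fCycles-1,0,-2)] + [1])
--         full_even_maps = sum([(i-1)*4 for i in range (fCycles, 0,-2)])
--     elif p == 1:
--         full_odd_maps  = sum([(i-1)*4 for i in range (fCycles,0,-2)] + [1])
--         full_even_maps = sum([(i-1)*4 for i in range (fCycles-1, 0,-2)])
--     return(full_even_maps, full_odd_maps)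
-- ===== SOURCE B (Python) =====
-- def calcMaps(fCycles):
--     # closed form: the quadratic sums collapse to squares; negative cycle
--     # counts behave as zero (all ranges empty).
--     n = max(fCycles, 0)
--     if n % 2 == 0:
--         return (n * n, (n - 1) ** 2)
--     return ((n - 1) ** 2, n * n)
-- ===== Notes on version B (the rewrite author's own statement) =====
-- stated objective: faster
-- what changed: Replaces building and summing two O(fCycles)-length range lists with the closed-form squares n^2 and (n-1)^2 chosen by parity (negatives clamp to 0).
import Mathlib
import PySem

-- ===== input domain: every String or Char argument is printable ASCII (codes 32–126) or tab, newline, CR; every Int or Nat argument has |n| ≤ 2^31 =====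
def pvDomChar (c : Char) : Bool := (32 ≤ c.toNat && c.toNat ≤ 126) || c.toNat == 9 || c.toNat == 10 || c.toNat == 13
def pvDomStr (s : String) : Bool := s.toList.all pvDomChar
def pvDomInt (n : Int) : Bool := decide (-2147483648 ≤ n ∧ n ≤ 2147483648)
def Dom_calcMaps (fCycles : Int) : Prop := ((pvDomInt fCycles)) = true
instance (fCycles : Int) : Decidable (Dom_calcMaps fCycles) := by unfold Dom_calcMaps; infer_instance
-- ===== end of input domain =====

-- B replaces A's two O(fCycles)-length summed range lists by closed-form squares: objective = faster (asymptotic).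

-- ===== PORT A =====
def calcMaps (fCycles : Int) : Int × Int :=
  let p := PySem.Int.mod fCycles 2
  if p = 0 then
    let full_odd_maps :=
      (((PySem.List.pyRange (fCycles - 1) 0 (-2)).map (fun i => (i - 1) * 4)) ++ [1]).foldl (· + ·) 0
    let full_even_maps :=
      ((PySem.List.pyRange fCycles 0 (-2)).map (fun i => (i - 1) * 4)).foldl (· + ·) 0
    (full_even_maps, full_odd_maps)
  else
    let full_odd_maps :=
      (((PySem.List.pyRange fCycles 0 (-2)).map (fun i => (i - 1) * 4)) ++ [1]).foldl (· + ·) 0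
    let full_even_maps :=
      ((PySem.List.pyRange (fCycles - 1) 0 (-2)).map (fun i => (i - 1) * 4)).foldl (· + ·) 0
    (full_even_maps, full_odd_maps)

-- ===== PORT B =====
def calcMaps_alt (fCycles : Int) : Int × Int :=
  let n := max fCycles 0
  if PySem.Int.mod n 2 = 0 then (n * n, (n - 1) ^ 2) else ((n - 1) ^ 2, n * n)

-- ===== PRECONDITION & SPEC =====
def Spec_calcMaps (fCycles : Int) (out : Int × Int) : Prop := out = calcMaps_alt fCycles
instance (fCycles : Int) (out : Int × Int) : Decidable (Spec_calcMaps fCycles out) := by unfold Spec_calcMaps; infer_instance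

-- ===== CLAIM (what is proved, stated in full; the proofs are below) =====
def Claim_equal_calcMaps : Prop := ∀ (fCycles : Int), Dom_calcMaps fCycles → Spec_calcMaps fCycles (calcMaps fCycles)

-- ===== LEMMAS AND PROOFS =====

theorem pvRange2_nil (n : Int) (h : n ≤ 0) : PySem.List.pyRange n 0 (-2) = [] := by
  simp [PySem.List.pyRange]
  omega

theorem pvRange2_cons (n : Int) (h : 0 < n) :
    PySem.List.pyRange n 0 (-2) = n :: PySem.List.pyRange (n - 2) 0 (-2) := by
  simp only [PySem.List.pyRange]
  norm_num
  have hc : ((n + 2 - 1) / 2).toNat = (if 2 < n then ((n - 1) / 2).toNat else 0) + 1 := by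
    split_ifs with h2
    · have : (n + 2 - 1) / 2 = (n - 1) / 2 + 1 := by omega
      rw [this]; omega
    · have : (n + 2 - 1) / 2 = 1 := by omega
      rw [this]; rfl
  rw [hc, if_pos h, List.range_succ_eq_map, List.map_cons, List.map_map]
  congr 1
  · norm_num
  · apply List.map_congr_left
    intro k _
    simp [Function.comp]
    ring

theorem pvFoldl_add_shift (a : Int) (xs : List Int) :
    xs.foldl (· + ·) a = a + xs.foldl (· + ·) 0 := by
  induction xs generalizing a with
  | nil => simp
  | cons x xs ih =>
    simp only [List.foldl_cons]
    rw [ih (a + x), ih (0 + x)]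
    ring

theorem pvSum4 (m : Nat) :
    ((PySem.List.pyRange (m : Int) 0 (-2)).map (fun i => (i - 1) * 4)).foldl (· + ·) 0
      = (m : Int) * m - (m : Int) % 2 := by
  induction m using Nat.strong_induction_on with
  | _ m ih =>
    match m with
    | 0 => simp [pvRange2_nil]
    | 1 =>
      push_cast
      rw [pvRange2_cons 1 (by norm_num)]
      norm_num [pvRange2_nil]
    | (k + 2) =>
      push_cast
      rw [pvRange2_cons ((k : Int) + 2) (by positivity)]
      have hk : ((k : Int) + 2) - 2 = (k : Int) := by ring
      rw [hk]
      simp only [List.map_cons, List.foldl_cons]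
      rw [pvFoldl_add_shift, ih k (by omega)]
      have hmod : ((k : Int) + 2) % 2 = (k : Int) % 2 := by omega
      rw [hmod]
      ring

theorem calcMaps_eq_alt (n : Int) : calcMaps n = calcMaps_alt n := by
  rcases le_or_gt n 0 with hle | hpos
  · -- n ≤ 0 : all ranges are empty
    have hmax : max n 0 = 0 := by omega
    rcases Int.emod_two_eq_zero_or_one n with h2 | h2 <;>
      simp [calcMaps, calcMaps_alt, h2, hmax, pvRange2_nil n hle,
        pvRange2_nil (n - 1) (by omega)]
  · -- 0 < n
    have hm : PySem.Int.mod n 2 = n % 2 := PySem.Int.mod_eq_emod_of_pos (by norm_num)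
    have hmax : max n 0 = n := by omega
    obtain ⟨m, hmn⟩ : ∃ m : Nat, n = (m : Int) := ⟨n.toNat, by omega⟩
    subst hmn
    rcases Int.emod_two_eq_zero_or_one (m : Int) with h2 | h2
    · -- even, so m ≥ 2
      obtain ⟨j, hj⟩ : ∃ j : Nat, m = j + 2 := ⟨m - 2, by omega⟩
      subst hj
      have h1 : ((j + 2 : Nat) : Int) - 1 = ((j + 1 : Nat) : Int) := by push_cast; ring
      have hjodd : ((j + 1 : Nat) : Int) % 2 = 1 := by push_cast at h2 ⊢; omega
      simp only [calcMaps, calcMaps_alt, hmax, hm, h2, h1,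
        List.foldl_append, List.foldl_cons, List.foldl_nil, pvSum4, hjodd,
        if_true, Prod.mk.injEq]
      constructor <;> (push_cast; ring)
    · -- odd
      obtain ⟨j, hj⟩ : ∃ j : Nat, m = j + 1 := ⟨m - 1, by omega⟩
      subst hj
      have h1 : ((j + 1 : Nat) : Int) - 1 = ((j : Nat) : Int) := by push_cast; ring
      have hjeven : ((j : Nat) : Int) % 2 = 0 := by push_cast at h2 ⊢; omega
      have hcond : ¬ (PySem.Int.mod ((j + 1 : Nat) : Int) 2 = 0) := by rw [hm, h2]; norm_num
      simp only [calcMaps, calcMaps_alt, hmax]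
      rw [if_neg hcond, if_neg hcond]
      simp only [h1, List.foldl_append, List.foldl_cons, List.foldl_nil, pvSum4,
        hjeven, h2, Prod.mk.injEq]
      constructor <;> (push_cast; ring)

-- ===== VERDICT (by name: the statement is the Claim_ definition above) =====
theorem calcMaps_spec : Claim_equal_calcMaps := by
  intro n _
  unfold Spec_calcMaps
  exact calcMaps_eq_alt n
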